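-- pv_equiv track=rewrite | github.com/cgug-aa/python_playground | aivle_coding_masters_2/beginner/pseudo_prime.py | solution
-- ===== SOURCE A (Python) =====
-- def solution(N, pseudo_primes):
--     for a in range(1, N-2):
--         for b in range(a+1, N-a-1):
--             for c in range(b+1, N-a-b):
--                 d = N - a - b - c
--                 if d > c and len({a, b, c, d}) == 4:
--                     cnt = sum(1 for x in [a, b, c, d] if x in pseudo_primes)
--                     if cnt >= 3:
--                         return True
--     return False
-- ===== SOURCE B (Python) =====
-- def ok(t, p, q, r):
--     return t >= 1 and t != p and t != q and t != r
--
--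
-- def pick_two(M, p, Q):
--     # q < r from the sorted tail Q; fourth part t = M - q - r
--     if not Q:
--         return False
--     q, rest = Q[0], Q[1:]
--     return any(ok(M - q - r, p, q, r) for r in rest) or pick_two(M, p, rest)
--
--
-- def any_triple(N, P):
--     if not P:
--         return False
--     p, rest = P[0], P[1:]
--     return pick_two(N - p, p, rest) or any_triple(N, rest)
--
--
-- def solution(N, pseudo_primes):
--     # only triples of distinct positive pseudo-primes matter; the fourth part is N - p - q - r
--     P = sorted({x for x in pseudo_primes if x >= 1})
--     return any_triple(N, P)
-- ===== Notes on version B (the rewrite author's own statement) =====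
-- stated objective: faster
-- what changed: Instead of scanning all integer triples (a,b,c) below N, B sorts the distinct positive pseudo-primes and recurses over triples of that list only, deriving the fourth part as N-p-q-r.
import Mathlib
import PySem

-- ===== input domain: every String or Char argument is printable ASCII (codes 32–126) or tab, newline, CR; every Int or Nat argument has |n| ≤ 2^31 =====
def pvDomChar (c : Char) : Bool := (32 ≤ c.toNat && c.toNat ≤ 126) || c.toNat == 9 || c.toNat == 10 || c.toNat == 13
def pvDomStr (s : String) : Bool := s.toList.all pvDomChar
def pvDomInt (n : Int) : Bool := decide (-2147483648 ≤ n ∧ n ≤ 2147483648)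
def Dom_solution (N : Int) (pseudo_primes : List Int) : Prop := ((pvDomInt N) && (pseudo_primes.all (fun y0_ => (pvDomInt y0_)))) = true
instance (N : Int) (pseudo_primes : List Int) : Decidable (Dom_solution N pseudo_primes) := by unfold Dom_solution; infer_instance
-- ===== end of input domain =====

-- B replaces A's scan of all integer triples below N by a recursion over triples of the
-- sorted distinct positive pseudo-primes, deriving the fourth part as N - p - q - r (faster).

-- ===== PORT A =====
def solution (N : Int) (pseudo_primes : List Int) : Bool :=
  (PySem.List.pyRange 1 (N - 2) 1).any (fun a =>
    (PySem.List.pyRange (a + 1) (N - a - 1) 1).any (fun b =>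
      (PySem.List.pyRange (b + 1) (N - a - b) 1).any (fun c =>
        let d := N - a - b - c
        decide (d > c) && ((PySem.Set.ofList [a, b, c, d]).length == 4) &&
          decide (3 ≤ List.countP (fun x => pseudo_primes.contains x) [a, b, c, d]))))

-- ===== PORT B =====
def pvOk (t p q r : Int) : Bool := decide (1 ≤ t) && (t != p) && (t != q) && (t != r)

def pvPickTwo (M p : Int) : List Int → Bool
  | [] => false
  | q :: rest => rest.any (fun r => pvOk (M - q - r) p q r) || pvPickTwo M p rest

def pvAnyTriple (N : Int) : List Int → Bool
  | [] => false
  | p :: rest => pvPickTwo (N - p) p rest || pvAnyTriple N rest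

def solution_alt (N : Int) (pseudo_primes : List Int) : Bool :=
  pvAnyTriple N
    (PySem.List.sorted (PySem.Set.ofList (pseudo_primes.filter (fun x => decide (1 ≤ x))))
      (fun x => x) false)

-- ===== PRECONDITION & SPEC =====
def Spec_solution (N : Int) (pseudo_primes : List Int) (out : Bool) : Prop := out = solution_alt N pseudo_primes
instance (N : Int) (pseudo_primes : List Int) (out : Bool) : Decidable (Spec_solution N pseudo_primes out) := by unfold Spec_solution; infer_instance

-- ===== CLAIM (what is proved, stated in full; the proofs are below) =====
def Claim_equal_solution : Prop := ∀ (N : Int) (pseudo_primes : List Int), Dom_solution N pseudo_primes → Spec_solution N pseudo_primes (solution N pseudo_primes)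

-- ===== LEMMAS AND PROOFS =====

-- the common characterization: N splits into 1 ≤ a < b < c < d with at least 3 parts in ps
def pvE (N : Int) (ps : List Int) : Prop :=
  ∃ a b c d : Int, 1 ≤ a ∧ a < b ∧ b < c ∧ c < d ∧ a + b + c + d = N ∧
    3 ≤ List.countP (fun x => ps.contains x) [a, b, c, d]

theorem pvSetLen4 (a b c d : Int) (h1 : a < b) (h2 : b < c) (h3 : c < d) :
    (PySem.Set.ofList [a, b, c, d]).length = 4 := by
  rw [PySem.Set.ofList_eq_self_of_nodup]
  · rfl
  · simp [List.nodup_cons]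
    omega

theorem pvA_iff (N : Int) (ps : List Int) : solution N ps = true ↔ pvE N ps := by
  unfold solution pvE
  simp only [List.any_eq_true, PySem.List.mem_pyRange_one, Bool.and_eq_true, decide_eq_true_eq,
    beq_iff_eq, gt_iff_lt]
  constructor
  · rintro ⟨a, ⟨ha1, ha2⟩, b, ⟨hb1, hb2⟩, c, ⟨hc1, hc2⟩, ⟨⟨hdc, _hlen⟩, hcnt⟩⟩
    exact ⟨a, b, c, N - a - b - c, by omega, by omega, by omega, by omega, by omega, hcnt⟩
  · rintro ⟨a, b, c, d, h1, h2, h3, h4, h5, hcnt⟩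
    have hd : N - a - b - c = d := by omega
    refine ⟨a, ⟨by omega, by omega⟩, b, ⟨by omega, by omega⟩, c, ⟨by omega, by omega⟩,
      ⟨⟨by omega, ?_⟩, ?_⟩⟩
    · rw [hd]; exact pvSetLen4 a b c d h2 h3 h4
    · rw [hd]; exact hcnt

theorem pvPickTwo_iff (M p : Int) (Q : List Int) (hQ : Q.Pairwise (· < ·)) :
    pvPickTwo M p Q = true ↔
      ∃ q r, q ∈ Q ∧ r ∈ Q ∧ q < r ∧ pvOk (M - q - r) p q r = true := by
  induction Q with
  | nil => simp [pvPickTwo]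
  | cons q rest ih =>
    rw [List.pairwise_cons] at hQ
    obtain ⟨hlt, hrest⟩ := hQ
    simp only [pvPickTwo, Bool.or_eq_true, List.any_eq_true, ih hrest]
    constructor
    · rintro (⟨r, hr, hok⟩ | ⟨q', r', hq', hr', hlt', hok⟩)
      · exact ⟨q, r, List.mem_cons_self, List.mem_cons_of_mem _ hr, hlt r hr, hok⟩
      · exact ⟨q', r', List.mem_cons_of_mem _ hq', List.mem_cons_of_mem _ hr', hlt', hok⟩
    · rintro ⟨q', r', hq', hr', hqr, hok⟩
      rcases List.mem_cons.mp hq' with heq | hq2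
      · subst heq
        rcases List.mem_cons.mp hr' with heq2 | hr2
        · subst heq2
          exact absurd hqr (lt_irrefl _)
        · exact Or.inl ⟨r', hr2, hok⟩
      · rcases List.mem_cons.mp hr' with heq2 | hr2
        · exfalso
          rw [heq2] at hqr
          have := hlt q' hq2
          omega
        · exact Or.inr ⟨q', r', hq2, hr2, hqr, hok⟩

theorem pvAnyTriple_iff (N : Int) (P : List Int) (hP : P.Pairwise (· < ·)) :
    pvAnyTriple N P = true ↔
      ∃ p q r, p ∈ P ∧ q ∈ P ∧ r ∈ P ∧ p < q ∧ q < r ∧ pvOk (N - p - q - r) p q r = true := by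
  induction P with
  | nil => simp [pvAnyTriple]
  | cons p rest ih =>
    rw [List.pairwise_cons] at hP
    obtain ⟨hlt, hrest⟩ := hP
    simp only [pvAnyTriple, Bool.or_eq_true, ih hrest, pvPickTwo_iff (N - p) p rest hrest]
    constructor
    · rintro (⟨q, r, hq, hr, hqr, hok⟩ | ⟨p', q', r', hp', hq', hr', h1, h2, hok⟩)
      · exact ⟨p, q, r, List.mem_cons_self, List.mem_cons_of_mem _ hq,
          List.mem_cons_of_mem _ hr, hlt q hq, hqr, hok⟩
      · exact ⟨p', q', r', List.mem_cons_of_mem _ hp', List.mem_cons_of_mem _ hq',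
          List.mem_cons_of_mem _ hr', h1, h2, hok⟩
    · rintro ⟨p', q', r', hp', hq', hr', h1, h2, hok⟩
      rcases List.mem_cons.mp hp' with heq | hp2
      · subst heq
        have hq2 : q' ∈ rest := by
          rcases List.mem_cons.mp hq' with heq2 | h
          · exfalso; rw [heq2] at h1; exact lt_irrefl _ h1
          · exact h
        have hr2 : r' ∈ rest := by
          rcases List.mem_cons.mp hr' with heq2 | h
          · exfalso; rw [heq2] at h2; have := hlt q' hq2; omega
          · exact h
        exact Or.inl ⟨q', r', hq2, hr2, h2, hok⟩
      · have hq2 : q' ∈ rest := by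
          rcases List.mem_cons.mp hq' with heq2 | h
          · exfalso; rw [heq2] at h1; have := hlt p' hp2; omega
          · exact h
        have hr2 : r' ∈ rest := by
          rcases List.mem_cons.mp hr' with heq2 | h
          · exfalso; rw [heq2] at h2; have := hlt p' hp2; have := hlt q' hq2; omega
          · exact h
        exact Or.inr ⟨p', q', r', hp2, hq2, hr2, h1, h2, hok⟩

theorem pvB_iff (N : Int) (ps : List Int) : solution_alt N ps = true ↔ pvE N ps := by
  unfold solution_alt
  set S := PySem.List.sorted (PySem.Set.ofList (ps.filter (fun x => decide (1 ≤ x))))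
    (fun x => x) false with hS
  have hpair : S.Pairwise (· < ·) := PySem.List.sorted_ofList_pairwise_lt _
  have hmem : ∀ x : Int, x ∈ S ↔ x ∈ ps ∧ 1 ≤ x := by
    intro x
    rw [hS, PySem.List.mem_sorted, PySem.Set.mem_ofList, List.mem_filter]
    simp
  have hcont : ∀ x : Int, ps.contains x = true ↔ x ∈ ps := by
    intro x; simp
  rw [pvAnyTriple_iff N S hpair]
  unfold pvE
  constructor
  · rintro ⟨p, q, r, hp, hq, hr, hpq, hqr, hok⟩
    simp only [pvOk, Bool.and_eq_true, decide_eq_true_eq, bne_iff_ne, ne_eq] at hok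
    obtain ⟨⟨⟨ht1, htp⟩, htq⟩, htr⟩ := hok
    obtain ⟨hpps, hp1⟩ := (hmem p).mp hp
    obtain ⟨hqps, hq1⟩ := (hmem q).mp hq
    obtain ⟨hrps, hr1⟩ := (hmem r).mp hr
    have cp : ps.contains p = true := (hcont p).mpr hpps
    have cq : ps.contains q = true := (hcont q).mpr hqps
    have cr : ps.contains r = true := (hcont r).mpr hrps
    rcases lt_trichotomy (N - p - q - r) p with h | h | h
    · refine ⟨N - p - q - r, p, q, r, by omega, by omega, by omega, by omega, by omega, ?_⟩
      simp only [List.countP_cons, List.countP_nil, cp, cq, cr]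
      split_ifs <;> omega
    · exact absurd h htp
    · rcases lt_trichotomy (N - p - q - r) q with h2 | h2 | h2
      · refine ⟨p, N - p - q - r, q, r, by omega, by omega, by omega, by omega, by omega, ?_⟩
        simp only [List.countP_cons, List.countP_nil, cp, cq, cr]
        split_ifs <;> omega
      · exact absurd h2 htq
      · rcases lt_trichotomy (N - p - q - r) r with h3 | h3 | h3
        · refine ⟨p, q, N - p - q - r, r, by omega, by omega, by omega, by omega, by omega, ?_⟩
          simp only [List.countP_cons, List.countP_nil, cp, cq, cr]
          split_ifs <;> omega
        · exact absurd h3 htr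
        · refine ⟨p, q, r, N - p - q - r, by omega, by omega, by omega, by omega, by omega, ?_⟩
          simp only [List.countP_cons, List.countP_nil, cp, cq, cr]
          split_ifs <;> omega
  · rintro ⟨a, b, c, d, h1, h2, h3, h4, h5, hcnt⟩
    have mk : ∀ p q r : Int, p ∈ ps → q ∈ ps → r ∈ ps → 1 ≤ p → p < q → q < r →
        1 ≤ N - p - q - r → N - p - q - r ≠ p → N - p - q - r ≠ q → N - p - q - r ≠ r →
        ∃ p q r, p ∈ S ∧ q ∈ S ∧ r ∈ S ∧ p < q ∧ q < r ∧ pvOk (N - p - q - r) p q r = true := by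
      intro p q r hp hq hr hp1 hpq hqr ht1 htp htq htr
      refine ⟨p, q, r, (hmem p).mpr ⟨hp, hp1⟩, (hmem q).mpr ⟨hq, by omega⟩,
        (hmem r).mpr ⟨hr, by omega⟩, hpq, hqr, ?_⟩
      simp only [pvOk, Bool.and_eq_true, decide_eq_true_eq, bne_iff_ne, ne_eq]
      exact ⟨⟨⟨ht1, htp⟩, htq⟩, htr⟩
    simp only [List.countP_cons, List.countP_nil] at hcnt
    by_cases ca : ps.contains a = true <;> by_cases cb : ps.contains b = true <;>
      by_cases cc : ps.contains c = true <;> by_cases cd : ps.contains d = true <;>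
      rw [hcont a] at ca <;> rw [hcont b] at cb <;> rw [hcont c] at cc <;> rw [hcont d] at cd
    · exact mk a b c ca cb cc
        h1 h2 h3 (by omega) (by omega) (by omega) (by omega)
    · exact mk a b c ca cb cc
        h1 h2 h3 (by omega) (by omega) (by omega) (by omega)
    · exact mk a b d ca cb cd
        h1 h2 (by omega) (by omega) (by omega) (by omega) (by omega)
    · simp [ca, cb, cc, cd] at hcnt
    · exact mk a c d ca cc cd
        h1 (by omega) h4 (by omega) (by omega) (by omega) (by omega)
    · simp [ca, cb, cc, cd] at hcnt
    · simp [ca, cb, cc, cd] at hcnt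
    · simp [ca, cb, cc, cd] at hcnt
    · exact mk b c d cb cc cd
        (by omega) h3 h4 (by omega) (by omega) (by omega) (by omega)
    · simp [ca, cb, cc, cd] at hcnt
    · simp [ca, cb, cc, cd] at hcnt
    · simp [ca, cb, cc, cd] at hcnt
    · simp [ca, cb, cc, cd] at hcnt
    · simp [ca, cb, cc, cd] at hcnt
    · simp [ca, cb, cc, cd] at hcnt
    · simp [ca, cb, cc, cd] at hcnt

-- ===== VERDICT (by name: the statement is the Claim_ definition above) =====
theorem solution_spec : Claim_equal_solution := by
  intro N ps _
  unfold Spec_solution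
  have hA := pvA_iff N ps
  have hB := pvB_iff N ps
  cases h1 : solution N ps <;> cases h2 : solution_alt N ps <;> simp_all
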